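-- pv_equiv track=rewrite | github.com/izhanulhamid786-blip/university-rag | ingest/chunker.py | _merge_tiny
-- ===== SOURCE A (Python) =====
-- def _merge_tiny(parts: list[str], min_len: int = 80) -> list[str]:
--     merged = []
--     for part in parts:
--         clean = part.strip()
--         if not clean:
--             continue
--         if len(clean) < min_len and merged:
--             merged[-1] = f"{merged[-1]}\n{clean}".strip()
--         else:
--             merged.append(clean)
--     return merged
-- ===== SOURCE B (Python) =====
-- def _merge_tiny(parts: list[str], min_len: int = 80) -> list[str]:
--     # Stage 1: strip everything and drop empties up front.
--     cleaned = [c for c in (p.strip() for p in parts) if c]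
--     # Stage 2: segment `cleaned` into groups by scanning ahead for the run of
--     # tiny fragments that follows each group head, then slice-and-join once.
--     n = len(cleaned)
--     out = []
--     i = 0
--     while i < n:
--         j = i + 1
--         while j < n and len(cleaned[j]) < min_len:
--             j += 1
--         out.append("\n".join(cleaned[i:j]))
--         i = j
--     return out
-- ===== Notes on version B (the rewrite author's own statement) =====
-- stated objective: faster
-- what changed: B first strips and filters all fragments in a separate pass, then segments the cleaned list with a two-index boundary scan (each group = a slice cleaned[i:j]) joined once, instead of A's single stateful pass that rebuilds and re-strips merged[-1] by string concatenation on every tiny fragment.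
import Mathlib
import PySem

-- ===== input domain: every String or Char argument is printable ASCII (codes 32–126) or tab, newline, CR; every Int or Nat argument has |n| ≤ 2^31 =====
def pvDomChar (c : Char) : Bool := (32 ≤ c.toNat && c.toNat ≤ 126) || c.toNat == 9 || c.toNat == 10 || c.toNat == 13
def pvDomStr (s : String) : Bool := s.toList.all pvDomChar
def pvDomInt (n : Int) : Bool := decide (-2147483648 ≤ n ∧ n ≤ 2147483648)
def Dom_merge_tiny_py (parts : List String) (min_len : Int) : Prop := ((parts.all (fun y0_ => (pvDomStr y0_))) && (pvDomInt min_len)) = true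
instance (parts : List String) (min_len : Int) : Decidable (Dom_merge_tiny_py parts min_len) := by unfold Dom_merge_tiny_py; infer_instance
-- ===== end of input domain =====

-- B strips/filters all fragments in one staged pass, then segments the cleaned list with a
-- two-index boundary scan and one join per slice, instead of A's stateful in-place rebuild of
-- merged[-1] (objective: alternative decomposition; same observable result).


-- ===== PORT A =====
-- A's loop, state = the list `merged` (as lists of code points; strings are rebuilt at the end).
-- merged[-1] = f"{merged[-1]}\n{clean}".strip() becomes replacing the last element.
def mergeTinyLoopA (min_len : Int) : List String → List (List Char) → List (List Char)
  | [], merged => merged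
  | part :: rest, merged =>
    let clean := PySem.Chars.strip part.toList
    if clean = [] then mergeTinyLoopA min_len rest merged
    else if (clean.length : Int) < min_len ∧ merged ≠ [] then
      mergeTinyLoopA min_len rest
        (merged.dropLast ++ [PySem.Chars.strip (merged.getLastD [] ++ '\n' :: clean)])
    else mergeTinyLoopA min_len rest (merged ++ [clean])

def merge_tiny_py (parts : List String) (min_len : Int) : List String :=
  (mergeTinyLoopA min_len parts []).map (fun cs => String.ofList cs)

-- ===== PORT B =====
-- inner `while j < n and len(cleaned[j]) < min_len: j += 1`
def scanJ (min_len : Int) (items : List (List Char)) (n j : Nat) : Nat :=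
  if h : j < n ∧ ((items.getD j []).length : Int) < min_len then scanJ min_len items n (j + 1) else j
termination_by n - j
decreasing_by omega

-- termination fact for the outer loop, cited by `decreasing_by` below
theorem scanJ_ge (min_len : Int) (items : List (List Char)) (n : Nat) :
    ∀ j, j ≤ scanJ min_len items n j := by
  intro j
  induction j using scanJ.induct min_len items n with
  | case1 j h ih => rw [scanJ, dif_pos h]; omega
  | case2 j h => rw [scanJ, dif_neg h]

-- outer `while i < n: … out.append("\n".join(cleaned[i:j])); i = j`
def buildLoop (min_len : Int) (items : List (List Char)) (n i : Nat) : List (List Char) :=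
  if h : i < n then
    let j := scanJ min_len items n (i + 1)
    PySem.Chars.join ['\n'] (PySem.List.slice items (some (i : Int)) (some (j : Int)))
      :: buildLoop min_len items n j
  else []
termination_by n - i
decreasing_by
  have := scanJ_ge min_len items n (i + 1)
  omega

def merge_tiny_py_alt (parts : List String) (min_len : Int) : List String :=
  let cleaned := (parts.map (fun p => PySem.Chars.strip p.toList)).filter (fun c => !c.isEmpty)
  (buildLoop min_len cleaned cleaned.length 0).map (fun cs => String.ofList cs)

-- ===== PRECONDITION & SPEC =====
def Spec_merge_tiny_py (parts : List String) (min_len : Int) (out : List String) : Prop := out = merge_tiny_py_alt parts min_len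
instance (parts : List String) (min_len : Int) (out : List String) : Decidable (Spec_merge_tiny_py parts min_len out) := by unfold Spec_merge_tiny_py; infer_instance

-- ===== CLAIM (what is proved, stated in full; the proofs are below) =====
def Claim_equal_merge_tiny_py : Prop := ∀ (parts : List String) (min_len : Int), Dom_merge_tiny_py parts min_len → Spec_merge_tiny_py parts min_len (merge_tiny_py parts min_len)

-- ===== LEMMAS AND PROOFS =====

-- "tiny" test shared by the proof-side reformulations
def tinyP (m : Int) (d : List Char) : Bool := decide ((d.length : Int) < m)

-- A's loop specialised to the cleaned fragments (each step's `strip part` already done)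
def loopA2 (m : Int) : List (List Char) → List (List Char) → List (List Char)
  | [], merged => merged
  | c :: rest, merged =>
    if (c.length : Int) < m ∧ merged ≠ [] then
      loopA2 m rest (merged.dropLast ++ [PySem.Chars.strip (merged.getLastD [] ++ '\n' :: c)])
    else loopA2 m rest (merged ++ [c])

-- structural (takeWhile/dropWhile) form of B's grouping
def buildB2 (m : Int) : List (List Char) → List (List Char)
  | [] => []
  | c :: rest =>
    PySem.Chars.join ['\n'] (c :: rest.takeWhile (tinyP m))
      :: buildB2 m (rest.dropWhile (tinyP m))
termination_by l => l.length
decreasing_by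
  have := List.length_dropWhile_le (p := tinyP m) (l := rest)
  simp; omega

def cleanedOf (parts : List String) : List (List Char) :=
  (parts.map (fun p => PySem.Chars.strip p.toList)).filter (fun c => !c.isEmpty)

theorem buildB2_nil (m : Int) : buildB2 m [] = [] := by
  rw [buildB2.eq_def]

theorem buildB2_cons (m : Int) (c : List Char) (rest : List (List Char)) :
    buildB2 m (c :: rest)
      = PySem.Chars.join ['\n'] (c :: rest.takeWhile (tinyP m))
        :: buildB2 m (rest.dropWhile (tinyP m)) := by
  rw [buildB2.eq_def]

-- a non-empty fragment whose first and last characters are not whitespace (`strip` is a no-op on it)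
def GoodChars (cs : List Char) : Prop :=
  cs ≠ [] ∧ (∀ c, cs.head? = some c → PySem.Chars.isspace c = false)
         ∧ (∀ c, cs.getLast? = some c → PySem.Chars.isspace c = false)

theorem head?_dropWhile {α : Type} (p : α → Bool) (l : List α) (c : α)
    (h : (List.dropWhile p l).head? = some c) : p c = false := by
  induction l with
  | nil => simp [List.dropWhile] at h
  | cons a t ih =>
    by_cases hp : p a = true
    · simpa [List.dropWhile, hp] using ih (by simpa [List.dropWhile, hp] using h)
    · simp [List.dropWhile, hp] at h
      simpa [← h] using (by simpa using hp : p a = false)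

theorem strip_eq_self_of_good (cs : List Char) (h : GoodChars cs) : PySem.Chars.strip cs = cs := by
  obtain ⟨hne, hhd, hlt⟩ := h
  have hl : PySem.Chars.lstrip cs = cs := by
    cases cs with
    | nil => simp at hne
    | cons a t =>
      have : PySem.Chars.isspace a = false := hhd a (by simp)
      simp [PySem.Chars.lstrip, List.dropWhile, this]
  have hr : PySem.Chars.rstrip cs = cs := by
    rcases hrev : cs.reverse with _ | ⟨a, t⟩
    · simp_all
    · have ha : cs.getLast? = some a := by
        rw [← List.head?_reverse, hrev]; simp
      have : PySem.Chars.isspace a = false := hlt a ha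
      have hcs : t.reverse ++ [a] = cs := by simpa using (congrArg List.reverse hrev).symm
      simp [PySem.Chars.rstrip, hrev, this]
      exact hcs
  simp [PySem.Chars.strip, hl, hr]

theorem good_strip (cs : List Char) (h : PySem.Chars.strip cs ≠ []) :
    GoodChars (PySem.Chars.strip cs) := by
  refine ⟨h, ?_, ?_⟩
  · intro c hc
    have hsuf := List.dropWhile_suffix (l := (PySem.Chars.lstrip cs).reverse) PySem.Chars.isspace
    obtain ⟨pre, hpre⟩ := hsuf
    have hx : PySem.Chars.lstrip cs
        = (List.dropWhile PySem.Chars.isspace (PySem.Chars.lstrip cs).reverse).reverse ++ pre.reverse := by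
      have := congrArg List.reverse hpre
      simpa using this.symm
    have hc' : (PySem.Chars.lstrip cs).head? = some c := by
      have hne : (List.dropWhile PySem.Chars.isspace (PySem.Chars.lstrip cs).reverse).reverse ≠ [] := by
        intro hnil
        apply h
        simp [PySem.Chars.strip, PySem.Chars.rstrip, hnil]
      rw [hx, List.head?_append]
      rcases hy : (List.dropWhile PySem.Chars.isspace (PySem.Chars.lstrip cs).reverse).reverse with _ | ⟨b, tb⟩
      · exact absurd hy hne
      · have : ((PySem.Chars.strip cs).head? = some c) := hc
        simp only [PySem.Chars.strip, PySem.Chars.rstrip] at this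
        rw [hy] at this
        simp [this]
    exact head?_dropWhile _ _ _ (by simpa [PySem.Chars.lstrip] using hc')
  · intro c hc
    have : (List.dropWhile PySem.Chars.isspace (PySem.Chars.lstrip cs).reverse).head? = some c := by
      have := hc
      simp only [PySem.Chars.strip, PySem.Chars.rstrip, List.getLast?_reverse] at this
      exact this
    exact head?_dropWhile _ _ _ this

theorem good_append (a b : List Char) (ha : GoodChars a) (hb : GoodChars b) :
    GoodChars (a ++ '\n' :: b) := by
  obtain ⟨hane, hahd, _⟩ := ha
  obtain ⟨hbne, _, hblt⟩ := hb
  refine ⟨by simp, ?_, ?_⟩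
  · intro c hc
    rcases a with _ | ⟨x, t⟩
    · simp at hane
    · exact hahd c (by simpa using hc)
  · intro c hc
    rw [List.getLast?_append] at hc
    rcases hbl : b.getLast? with _ | d
    · simp at hbne; simp_all
    · have : ('\n' :: b).getLast? = some d := by
        rw [List.getLast?_cons, hbl]; simp
      rw [this] at hc
      simp at hc
      exact hblt c (hc ▸ hbl)

theorem good_join (g : List (List Char)) (hne : g ≠ []) (h : ∀ cs ∈ g, GoodChars cs) :
    GoodChars (PySem.Chars.join ['\n'] g) := by
  induction g with
  | nil => simp at hne
  | cons a t ih =>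
    cases t with
    | nil => simpa [PySem.Chars.join_singleton] using h a (by simp)
    | cons b u =>
      rw [PySem.Chars.join_cons_cons]
      have := good_append a (PySem.Chars.join ['\n'] (b :: u)) (h a (by simp))
        (ih (by simp) (fun cs hcs => h cs (by simp [hcs])))
      simpa using this

theorem join_concat (g : List (List Char)) (c : List Char) (hne : g ≠ []) :
    PySem.Chars.join ['\n'] (g ++ [c]) = PySem.Chars.join ['\n'] g ++ '\n' :: c := by
  induction g with
  | nil => simp at hne
  | cons a t ih =>
    cases t with
    | nil => simp [PySem.Chars.join_singleton, PySem.Chars.join_cons_cons]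
    | cons b u =>
      simp only [List.cons_append]
      rw [PySem.Chars.join_cons_cons]
      have h2 := ih (by simp)
      simp only [List.cons_append] at h2
      rw [h2, PySem.Chars.join_cons_cons]
      simp

-- A's loop only depends on the cleaned fragments
theorem loopA_eq_loopA2 (m : Int) :
    ∀ (parts : List String) (merged : List (List Char)),
      mergeTinyLoopA m parts merged = loopA2 m (cleanedOf parts) merged := by
  intro parts
  induction parts with
  | nil => intro merged; rfl
  | cons part rest ih =>
    intro merged
    by_cases hc : PySem.Chars.strip part.toList = []
    · simp [mergeTinyLoopA, cleanedOf, hc]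
      simpa [cleanedOf] using ih merged
    · have hfil : cleanedOf (part :: rest) = PySem.Chars.strip part.toList :: cleanedOf rest := by
        simp [cleanedOf, hc]
      rw [hfil, loopA2]
      simp only [mergeTinyLoopA]
      rw [if_neg hc]
      by_cases h : ((PySem.Chars.strip part.toList).length : Int) < m ∧ merged ≠ []
      · rw [if_pos h, if_pos h]; apply ih
      · rw [if_neg h, if_neg h]; apply ih

theorem goodChars_cleaned (parts : List String) :
    ∀ c ∈ cleanedOf parts, GoodChars c := by
  intro c hc
  simp only [cleanedOf, List.mem_filter, List.mem_map] at hc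
  obtain ⟨⟨p, _, hp⟩, hne⟩ := hc
  subst hp
  apply good_strip
  simpa using hne

-- main invariant: A's loop versus the structural grouping
theorem loopA2_main (m : Int) :
    ∀ (cs : List (List Char)), (∀ c ∈ cs, GoodChars c) →
    ∀ (gs acc : List (List Char)), acc ≠ [] → (∀ x ∈ acc, GoodChars x) →
      loopA2 m cs (gs ++ [PySem.Chars.join ['\n'] acc])
        = gs ++ PySem.Chars.join ['\n'] (acc ++ cs.takeWhile (tinyP m))
            :: buildB2 m (cs.dropWhile (tinyP m)) := by
  intro cs
  induction cs with
  | nil =>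
    intro _ gs acc _ _
    simp [loopA2, buildB2_nil]
  | cons c rest ih =>
    intro hgood gs acc haccne haccgood
    have hcgood : GoodChars c := hgood c (by simp)
    by_cases htiny : (c.length : Int) < m
    · have hcond : (c.length : Int) < m ∧ gs ++ [PySem.Chars.join ['\n'] acc] ≠ [] := ⟨htiny, by simp⟩
      have hstrip : PySem.Chars.strip (PySem.Chars.join ['\n'] acc ++ '\n' :: c)
          = PySem.Chars.join ['\n'] (acc ++ [c]) := by
        rw [join_concat acc c haccne]
        exact strip_eq_self_of_good _ (good_append _ _ (good_join acc haccne haccgood) hcgood)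
      have hstate : (gs ++ [PySem.Chars.join ['\n'] acc]).dropLast ++
            [PySem.Chars.strip ((gs ++ [PySem.Chars.join ['\n'] acc]).getLastD [] ++ '\n' :: c)]
          = gs ++ [PySem.Chars.join ['\n'] (acc ++ [c])] := by
        simp [hstrip]
      rw [loopA2, if_pos hcond, hstate]
      have haccgood' : ∀ x ∈ acc ++ [c], GoodChars x := by
        intro x hx
        rcases List.mem_append.mp hx with h1 | h1
        · exact haccgood x h1
        · simp at h1; subst h1; exact hcgood
      rw [ih (fun d hd => hgood d (by simp [hd])) gs (acc ++ [c]) (by simp) haccgood']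
      have htP : tinyP m c = true := by simp [tinyP, htiny]
      simp [htP]
    · have hcond : ¬ ((c.length : Int) < m ∧ gs ++ [PySem.Chars.join ['\n'] acc] ≠ []) := by
        intro h; exact htiny h.1
      rw [loopA2, if_neg hcond]
      have hsing : gs ++ [PySem.Chars.join ['\n'] acc] ++ [c]
          = (gs ++ [PySem.Chars.join ['\n'] acc]) ++ [PySem.Chars.join ['\n'] [c]] := by
        simp [PySem.Chars.join_singleton]
      rw [hsing, ih (fun d hd => hgood d (by simp [hd])) (gs ++ [PySem.Chars.join ['\n'] acc]) [c]
        (by simp) (by intro x hx; simp at hx; subst hx; exact hcgood)]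
      have htP : tinyP m c = false := by simp [tinyP]; omega
      rw [List.takeWhile_cons, if_neg (by simp [htP]),
        List.dropWhile_cons_of_neg (by simp [htP]), buildB2_cons]
      simp

theorem loopA2_eq_buildB2 (m : Int) (cs : List (List Char)) (hgood : ∀ c ∈ cs, GoodChars c) :
    loopA2 m cs [] = buildB2 m cs := by
  cases cs with
  | nil => simp [loopA2, buildB2_nil]
  | cons c rest =>
    have hcgood : GoodChars c := hgood c (by simp)
    have hcond : ¬ ((c.length : Int) < m ∧ ([] : List (List Char)) ≠ []) := by simp
    rw [loopA2, if_neg hcond]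
    have : ([] : List (List Char)) ++ [c] = [] ++ [PySem.Chars.join ['\n'] [c]] := by
      simp [PySem.Chars.join_singleton]
    rw [this, loopA2_main m rest (fun d hd => hgood d (by simp [hd])) [] [c] (by simp)
      (by intro x hx; simp at hx; subst hx; exact hcgood)]
    rw [buildB2_cons]
    simp

-- the inner while-loop scans exactly the tiny run
theorem scanJ_eq (m : Int) (cs : List (List Char)) :
    ∀ j, j ≤ cs.length →
      scanJ m cs cs.length j = j + ((cs.drop j).takeWhile (tinyP m)).length := by
  suffices H : ∀ k j, cs.length - j = k → j ≤ cs.length →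
      scanJ m cs cs.length j = j + ((cs.drop j).takeWhile (tinyP m)).length by
    exact fun j h => H _ j rfl h
  intro k
  induction k with
  | zero =>
    intro j hk hj
    have hje : j = cs.length := by omega
    subst hje
    rw [scanJ, dif_neg (by omega)]
    simp
  | succ k ihk =>
    intro j hk hj
    have hjlt : j < cs.length := by omega
    have hdrop : cs.drop j = cs[j] :: cs.drop (j + 1) := List.drop_eq_getElem_cons hjlt
    have hgetD : cs.getD j [] = cs[j] := List.getD_eq_getElem cs [] hjlt
    by_cases ht : ((cs[j] : List Char).length : Int) < m
    · rw [scanJ, dif_pos ⟨hjlt, by rw [hgetD]; exact ht⟩]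
      rw [ihk (j + 1) (by omega) (by omega)]
      rw [hdrop]
      have htP : tinyP m cs[j] = true := by simp [tinyP, ht]
      rw [List.takeWhile_cons, if_pos htP]
      simp only [List.length_cons]
      omega
    · rw [scanJ, dif_neg (by rw [hgetD]; exact fun h => ht h.2)]
      rw [hdrop]
      have htP : tinyP m cs[j] = false := by simp [tinyP]; omega
      rw [List.takeWhile_cons, if_neg (by simp [htP])]
      simp

theorem buildLoop_eq (m : Int) (cs : List (List Char)) :
    ∀ k i, cs.length - i = k → buildLoop m cs cs.length i = buildB2 m (cs.drop i) := by
  intro k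
  induction k using Nat.strong_induction_on with
  | _ k IH =>
    intro i hk
    by_cases h : i < cs.length
    · have hscan := scanJ_eq m cs (i + 1) (by omega)
      set t := ((cs.drop (i + 1)).takeWhile (tinyP m)).length with ht
      have htle : t ≤ cs.length - (i + 1) := by
        have h1 := (List.takeWhile_sublist (p := tinyP m) (l := cs.drop (i + 1))).length_le
        simp at h1
        omega
      have hjn : scanJ m cs cs.length (i + 1) = i + 1 + t := hscan
      have hdrop : cs.drop i = cs[i] :: cs.drop (i + 1) := List.drop_eq_getElem_cons h
      have htwdw := List.takeWhile_append_dropWhile (p := tinyP m) (l := cs.drop (i + 1))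
      have hslice : PySem.List.slice cs (some (i : Int)) (some ((i + 1 + t : Nat) : Int))
          = cs[i] :: (cs.drop (i + 1)).takeWhile (tinyP m) := by
        rw [PySem.List.slice_natCast]
        rw [hdrop]
        have hsub : (i + 1 + t) - i = t + 1 := by omega
        rw [hsub, List.take_succ_cons]
        congr 1
        conv_lhs => rw [← htwdw]
        exact List.take_left' rfl
      have hdropj : cs.drop (i + 1 + t) = (cs.drop (i + 1)).dropWhile (tinyP m) := by
        have : cs.drop (i + 1 + t) = (cs.drop (i + 1)).drop t := by
          rw [List.drop_drop]
        rw [this]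
        conv_lhs => rw [← htwdw]
        exact List.drop_left' rfl
      rw [buildLoop, dif_pos h]
      simp only [hjn]
      rw [hslice]
      rw [IH (cs.length - (i + 1 + t)) (by omega) (i + 1 + t) rfl]
      rw [hdropj]
      conv_rhs => rw [hdrop, buildB2_cons]
    · rw [buildLoop, dif_neg h]
      rw [List.drop_of_length_le (by omega), buildB2_nil]

-- ===== VERDICT (by name: the statement is the Claim_ definition above) =====
theorem merge_tiny_py_spec : Claim_equal_merge_tiny_py := by
  intro parts min_len _
  unfold Spec_merge_tiny_py merge_tiny_py merge_tiny_py_alt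
  rw [loopA_eq_loopA2, loopA2_eq_buildB2 min_len _ (goodChars_cleaned parts)]
  show _ = (buildLoop min_len (cleanedOf parts) (cleanedOf parts).length 0).map
    (fun cs => String.ofList cs)
  rw [buildLoop_eq min_len (cleanedOf parts) (cleanedOf parts).length 0 rfl]
  rfl
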